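-- pv_equiv track=rewrite | github.com/ldayton/Parable | transpiler/src/backend/go.py | _to_pascal
-- ===== SOURCE A (Python) =====
-- def _to_pascal(name: str) -> str:
--     """Convert snake_case to PascalCase. Private methods (underscore prefix) become unexported."""
--     is_private = name.startswith("_")
--     if is_private:
--         name = name[1:]
--     parts = name.split("_")
--     # Use upper on first char only (not capitalize which lowercases rest)
--     result = "".join((p[0].upper() + p[1:]) if p else "" for p in parts)
--     # All-caps names (constants) stay all-caps even if originally private
--     if name.isupper():
--         return result
--     if is_private:
--         # Make first letter lowercase for unexported (private) names
--         return result[0].lower() + result[1:] if result else result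
--     return result
-- ===== SOURCE B (Python) =====
-- def _to_pascal(name: str) -> str:
--     """Single pass: skip underscores, choose each emitted char's case inline (no post-fix step)."""
--     is_private = name.startswith("_")
--     body = name[1:] if is_private else name
--     keep_caps = body.isupper()
--     out = []
--     at_start = True
--     first_done = False
--     for c in body:
--         if c == "_":
--             at_start = True
--         elif at_start:
--             if not first_done and is_private and not keep_caps:
--                 out.append(c.lower())
--             else:
--                 out.append(c.upper())
--             at_start = False
--             first_done = True
--         else:
--             out.append(c)
--     return "".join(out)
-- ===== Notes on version B (the rewrite author's own statement) =====
-- stated objective: simpler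
-- what changed: Replaces split-on-underscore plus join of capitalized parts plus a post-pass that lowercases the first letter of the result, with one left-to-right character walk that decides each emitted character's case inline (word-start flag, first-emitted flag, privacy/all-caps flags), so there is no intermediate parts list and no result fix-up.
import Mathlib
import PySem

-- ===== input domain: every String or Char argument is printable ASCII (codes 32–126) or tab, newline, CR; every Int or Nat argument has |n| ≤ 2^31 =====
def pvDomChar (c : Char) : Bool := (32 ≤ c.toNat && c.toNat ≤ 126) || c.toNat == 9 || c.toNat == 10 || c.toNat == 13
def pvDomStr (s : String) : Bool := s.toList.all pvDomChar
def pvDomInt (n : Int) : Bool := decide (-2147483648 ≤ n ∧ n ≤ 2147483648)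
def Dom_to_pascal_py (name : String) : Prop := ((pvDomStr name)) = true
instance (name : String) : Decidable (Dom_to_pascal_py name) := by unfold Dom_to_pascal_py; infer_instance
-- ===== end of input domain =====

-- B replaces A's split-on-'_' + join-of-capitalized-parts + post-lowering of the result's first
-- letter with one char walk that decides each emitted char's case inline; objective: simpler.

-- shared helper: Python str.isupper() (at least one cased char and no lowercase one);
-- exact on the printable-ASCII domain, where the cased characters are exactly the letters.
def pyIsupperChars (cs : List Char) : Bool :=
  (!cs.any PySem.Chars.islower) && cs.any PySem.Chars.isupper

-- ===== PORT A =====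
-- (p[0].upper() + p[1:]) if p else ""   — single-char .upper() is upperChar on ASCII
def capPart (p : List Char) : List Char :=
  match p with
  | [] => []
  | c :: rest => PySem.Chars.upperChar c :: rest

def to_pascal_py (name : String) : String :=
  let cs := name.toList
  let is_private := PySem.Chars.startswith cs ['_']
  let cs2 := if is_private then PySem.Chars.slice cs (some 1) none else cs
  let parts := PySem.Chars.splitOn cs2 ['_']
  let result := PySem.Chars.join [] (parts.map capPart)
  if pyIsupperChars cs2 then String.ofList result
  else if is_private then
    match result with
    | [] => String.ofList result
    | c :: rest => String.ofList (PySem.Chars.lowerChar c :: rest)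
  else String.ofList result

-- ===== PORT B =====
-- Source B's for-loop over body: state = (at_start, first_done); privacy/all-caps flags fixed
def altWalk (priv keep : Bool) : List Char → Bool → Bool → List Char
  | [], _, _ => []
  | c :: rest, atStart, firstDone =>
    if c = '_' then altWalk priv keep rest true firstDone
    else if atStart then
      (if !firstDone && priv && !keep then PySem.Chars.lowerChar c else PySem.Chars.upperChar c)
        :: altWalk priv keep rest false true
    else c :: altWalk priv keep rest false firstDone

def to_pascal_py_alt (name : String) : String :=
  let cs := name.toList
  let priv := PySem.Chars.startswith cs ['_']
  let body := if priv then PySem.Chars.slice cs (some 1) none else cs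
  String.ofList (altWalk priv (pyIsupperChars body) body true false)

-- ===== PRECONDITION & SPEC =====
def Spec_to_pascal_py (name : String) (out : String) : Prop := out = to_pascal_py_alt name
instance (name : String) (out : String) : Decidable (Spec_to_pascal_py name out) := by unfold Spec_to_pascal_py; infer_instance

-- ===== CLAIM (what is proved, stated in full; the proofs are below) =====
def Claim_equal_to_pascal_py : Prop := ∀ (name : String), Dom_to_pascal_py name → Spec_to_pascal_py name (to_pascal_py name)

-- ===== LEMMAS AND PROOFS =====

theorem char_le_iff_toNat (a b : Char) : (a ≤ b) ↔ a.toNat ≤ b.toNat := by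
  rw [Char.le_def, UInt32.le_iff_toNat_le]
  rfl

theorem toNat_ofNat_valid (n : Nat) (h : n.isValidChar) : (Char.ofNat n).toNat = n := by
  simp [Char.ofNat, h, Char.toNat, Char.ofNatAux]

theorem lower_upper (c : Char) :
    PySem.Chars.lowerChar (PySem.Chars.upperChar c) = PySem.Chars.lowerChar c := by
  simp only [PySem.Chars.lowerChar, PySem.Chars.upperChar, PySem.Chars.islower,
    PySem.Chars.isupper, Bool.and_eq_true, decide_eq_true_eq]
  by_cases h1 : 'a' ≤ c ∧ c ≤ 'z'
  · have hn : 97 ≤ c.toNat ∧ c.toNat ≤ 122 :=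
      ⟨(char_le_iff_toNat _ _).mp h1.1, (char_le_iff_toNat _ _).mp h1.2⟩
    have hval : ((c.toNat : Nat) - 32).isValidChar := by left; omega
    have ht : (Char.ofNat (c.toNat - 32)).toNat = c.toNat - 32 := toNat_ofNat_valid _ hval
    rw [if_pos h1]
    have hA : ('A' : Char).toNat = 65 := rfl
    have hZ : ('Z' : Char).toNat = 90 := rfl
    have h2 : 'A' ≤ Char.ofNat (c.toNat - 32) ∧ Char.ofNat (c.toNat - 32) ≤ 'Z' := by
      constructor
      · rw [char_le_iff_toNat, ht, hA]; omega
      · rw [char_le_iff_toNat, ht, hZ]; omega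
    rw [if_pos h2]
    have h3 : ¬ ('A' ≤ c ∧ c ≤ 'Z') := by
      rintro ⟨-, hb⟩
      have := (char_le_iff_toNat _ _).mp hb
      rw [hZ] at this
      omega
    rw [if_neg h3, ht]
    apply Char.ext
    apply UInt32.toNat_inj.mp
    show (Char.ofNat (c.toNat - 32 + 32)).toNat = c.toNat
    rw [toNat_ofNat_valid _ (by left; omega)]
    omega
  · rw [if_neg h1]

-- plain all-uppercase-at-word-start walk: what A's join of capitalized parts computes
def walkUp : List Char → Bool → List Char
  | [], _ => []
  | c :: rest, atStart =>
    if c = '_' then walkUp rest true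
    else (if atStart then PySem.Chars.upperChar c else c) :: walkUp rest false

-- pure characterization of split-on-'_': (first part, remaining parts)
def split1 : List Char → List Char × List (List Char)
  | [] => ([], [])
  | c :: rest =>
    let (h, t) := split1 rest
    if c = '_' then ([], h :: t) else (c :: h, t)

lemma splitOn_go_spec (fuel : Nat) : ∀ (l cur : List Char) (acc : List (List Char)),
    l.length < fuel →
    PySem.Chars.splitOn.go ['_'] fuel l cur acc =
      acc.reverse ++ ((cur.reverse ++ (split1 l).1) :: (split1 l).2) := by
  induction fuel with
  | zero => intro l cur acc h; omega
  | succ n ih =>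
    intro l cur acc h
    cases l with
    | nil => simp [PySem.Chars.splitOn.go, split1]
    | cons c rest =>
      by_cases hc : c = '_'
      · subst hc
        simp only [PySem.Chars.splitOn.go, List.isPrefixOf, beq_self_eq_true, Bool.true_and,
          if_true, List.length_singleton, List.drop_one, List.tail_cons]
        rw [ih rest [] (cur.reverse :: acc) (by simpa using Nat.lt_of_succ_lt_succ h)]
        simp [split1]
      · simp only [PySem.Chars.splitOn.go]
        rw [if_neg (by simp [List.isPrefixOf]; intro hh; exact hc hh.symm)]
        rw [ih rest (c :: cur) acc (by simpa using Nat.lt_of_succ_lt_succ h)]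
        simp [split1, hc]

lemma splitOn_eq_split1 (cs : List Char) :
    PySem.Chars.splitOn cs ['_'] = (split1 cs).1 :: (split1 cs).2 := by
  unfold PySem.Chars.splitOn
  rw [splitOn_go_spec (cs.length + 1) cs [] [] (by omega)]
  simp

lemma walkUp_split1 (cs : List Char) :
    walkUp cs true = capPart (split1 cs).1 ++ ((split1 cs).2.map capPart).flatten ∧
    walkUp cs false = (split1 cs).1 ++ ((split1 cs).2.map capPart).flatten := by
  induction cs with
  | nil => simp [walkUp, split1, capPart]
  | cons c rest ih =>
    by_cases hc : c = '_'
    · subst hc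
      simp only [walkUp, if_true, split1]
      constructor <;> simp [capPart, ih.1]
    · obtain ⟨ih1, ih2⟩ := ih
      simp only [walkUp, if_neg hc, split1]
      cases h : split1 rest with
      | mk hh tt =>
        rw [h] at ih2
        constructor <;> simp [capPart, ih2]

lemma intersperse_nil_flatten {α : Type} (ls : List (List α)) :
    (List.intersperse ([] : List α) ls).flatten = ls.flatten := by
  induction ls with
  | nil => simp
  | cons p ps ih =>
    cases ps with
    | nil => simp
    | cons q qs => simp_all [List.intersperse]

lemma result_eq (cs : List Char) :
    PySem.Chars.join [] ((PySem.Chars.splitOn cs ['_']).map capPart) = walkUp cs true := by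
  rw [splitOn_eq_split1, (walkUp_split1 cs).1]
  simp [PySem.Chars.join, List.intercalate, intersperse_nil_flatten]

-- after the first emission (firstDone = true) the B walk is the plain walk
lemma altWalk_done (p k : Bool) (cs : List Char) : ∀ s, altWalk p k cs s true = walkUp cs s := by
  induction cs with
  | nil => intro s; rfl
  | cons c rest ih =>
    intro s
    by_cases hc : c = '_'
    · subst hc; simp [altWalk, walkUp, ih]
    · cases s <;> simp [altWalk, walkUp, hc, ih]

-- when the lowering branch can never fire (not private, or all-caps), B's walk is the plain walk
lemma altWalk_plain (p k : Bool) (h : (p && !k) = false) (cs : List Char) :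
    ∀ s f, altWalk p k cs s f = walkUp cs s := by
  induction cs with
  | nil => intro s f; rfl
  | cons c rest ih =>
    intro s f
    by_cases hc : c = '_'
    · subst hc; simp [altWalk, walkUp, ih]
    · have hcond : ∀ f', (!f' && p && !k) = false := by
        intro f'; cases p <;> cases k <;> simp_all
      cases s
      · simp [altWalk, walkUp, hc, ih]
      · simp [altWalk, walkUp, hc, ih, hcond]

-- private, not all-caps: B's walk lowercases exactly the first emitted character
lemma altWalk_priv (cs : List Char) :
    altWalk true false cs true false =
      (match walkUp cs true with
       | [] => []
       | c :: rest => PySem.Chars.lowerChar c :: rest) := by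
  induction cs with
  | nil => rfl
  | cons c rest ih =>
    by_cases hc : c = '_'
    · subst hc; simpa [altWalk, walkUp] using ih
    · simp only [altWalk, walkUp, if_neg hc]
      rw [altWalk_done]
      simp [lower_upper]

-- ===== VERDICT (by name: the statement is the Claim_ definition above) =====
theorem to_pascal_py_spec : Claim_equal_to_pascal_py := by
  intro name _
  show to_pascal_py name = to_pascal_py_alt name
  unfold to_pascal_py to_pascal_py_alt
  simp only [result_eq]
  set body := if PySem.Chars.startswith name.toList ['_'] then
      PySem.Chars.slice name.toList (some 1) none else name.toList with hbody
  by_cases hk : pyIsupperChars body = true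
  · rw [if_pos hk, altWalk_plain _ _ (by simp [hk])]
  · rw [if_neg hk]
    by_cases hp : PySem.Chars.startswith name.toList ['_'] = true
    · rw [if_pos hp, hp]
      simp only [Bool.not_eq_true] at hk
      rw [hk, altWalk_priv]
      cases walkUp body true <;> rfl
    · simp only [Bool.not_eq_true] at hp hk
      rw [hp, if_neg (by simp), altWalk_plain _ _ (by simp)]
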